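-- pv_equiv track=rewrite | github.com/torbeneims/ddfd | scripts/intmaker.py | build_hash_maps
-- ===== SOURCE A (Python) =====
-- def build_hash_maps(data):
--     hash_maps = {}
--     for row in data:
--         for col_idx, value in enumerate(row):
--             if col_idx not in hash_maps:
--                 hash_maps[col_idx] = {}
--             if value not in hash_maps[col_idx]:
--                 hash_maps[col_idx][value] = len(hash_maps[col_idx])
--     return hash_maps
-- ===== SOURCE B (Python) =====
-- def build_hash_maps(data):
--     # Pass 1: group cell values by column index (insertion-ordered, ragged-safe).
--     cols = {}
--     for row in data:
--         for i, v in enumerate(row):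
--             cols.setdefault(i, []).append(v)
--
--     # Pass 2: index each column's values by first appearance.
--     def index_map(vals):
--         m = {}
--         for v in vals:
--             if v not in m:
--                 m[v] = len(m)
--         return m
--
--     return {i: index_map(vals) for i, vals in cols.items()}
-- ===== Notes on version B (the rewrite author's own statement) =====
-- stated objective: alternative
-- what changed: Replaces the single pass that grows interleaved per-column dicts cell by cell with two separate passes: first group all cell values into per-column lists, then build each column's first-occurrence index map independently.
import Mathlib
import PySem

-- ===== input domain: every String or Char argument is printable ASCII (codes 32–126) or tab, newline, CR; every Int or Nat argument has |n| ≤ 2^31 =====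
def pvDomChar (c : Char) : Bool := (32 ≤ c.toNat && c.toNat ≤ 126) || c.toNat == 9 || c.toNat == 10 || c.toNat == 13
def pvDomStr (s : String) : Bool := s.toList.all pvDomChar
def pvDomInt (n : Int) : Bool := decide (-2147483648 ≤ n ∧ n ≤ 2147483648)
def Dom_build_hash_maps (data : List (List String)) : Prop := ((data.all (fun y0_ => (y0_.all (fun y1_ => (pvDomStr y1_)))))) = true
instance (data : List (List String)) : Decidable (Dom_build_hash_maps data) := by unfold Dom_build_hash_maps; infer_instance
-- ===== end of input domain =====

-- B changes the decomposition: one grouping pass into per-column value lists, then an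
-- independent first-occurrence indexing pass per column (same cost; 'alternative').

-- ===== PORT A =====
-- one cell of A's single pass: ensure hash_maps[i] exists, then assign a fresh index to a new value
def pvACell (hm : PySem.Dict Int (PySem.Dict String Int)) (iv : Int × String) :
    PySem.Dict Int (PySem.Dict String Int) :=
  let hm1 := if hm.contains iv.1 then hm else hm.insert iv.1 PySem.Dict.empty
  let m := hm1.getD iv.1 PySem.Dict.empty
  if m.contains iv.2 then hm1 else hm1.insert iv.1 (m.insert iv.2 (m.size : Int))

def build_hash_maps (data : List (List String)) : List (Int × List (String × Int)) :=
  (data.foldl (fun hm row => (PySem.List.enumerate row).foldl pvACell hm)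
      PySem.Dict.empty).items.map (fun p => (p.1, p.2.items))

-- ===== PORT B =====
-- B's helper index_map: first-occurrence index of each value in a column's list
def pvIndexMap (vals : List String) : PySem.Dict String Int :=
  vals.foldl (fun m v => if m.contains v then m else m.insert v (m.size : Int)) PySem.Dict.empty

-- cols.setdefault(i, []).append(v)  ≡  cols[i] = cols.get(i, []) + [v]
def pvGCell (d : PySem.Dict Int (List String)) (iv : Int × String) : PySem.Dict Int (List String) :=
  d.modify iv.1 [] (· ++ [iv.2])

def build_hash_maps_alt (data : List (List String)) : List (Int × List (String × Int)) :=
  let cols := data.foldl (fun d row => (PySem.List.enumerate row).foldl pvGCell d) PySem.Dict.empty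
  -- {i: index_map(vals) for i, vals in cols.items()}
  (cols.items.foldl (fun r p => r.insert p.1 (pvIndexMap p.2)) PySem.Dict.empty).items.map
    (fun p => (p.1, p.2.items))

-- ===== PRECONDITION & SPEC =====
def Spec_build_hash_maps (data : List (List String)) (out : List (Int × List (String × Int))) : Prop := out = build_hash_maps_alt data
instance (data : List (List String)) (out : List (Int × List (String × Int))) : Decidable (Spec_build_hash_maps data out) := by unfold Spec_build_hash_maps; infer_instance

-- ===== CLAIM (what is proved, stated in full; the proofs are below) =====
def Claim_equal_build_hash_maps : Prop := ∀ (data : List (List String)), Dom_build_hash_maps data → Spec_build_hash_maps data (build_hash_maps data)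

-- ===== LEMMAS AND PROOFS =====

-- F maps a grouping state to the corresponding state of A's nested dicts
def pvF (d : PySem.Dict Int (List String)) : PySem.Dict Int (PySem.Dict String Int) :=
  PySem.Dict.mk (d.items.map (fun p => (p.1, pvIndexMap p.2)))

theorem pvF_contains (d : PySem.Dict Int (List String)) (i : Int) :
    (pvF d).contains i = d.contains i := by
  simp [pvF, PySem.Dict.contains, List.any_map, Function.comp_def]

theorem pvIndexMap_append (l : List String) (v : String) :
    pvIndexMap (l ++ [v]) =
      (if (pvIndexMap l).contains v then pvIndexMap l
       else (pvIndexMap l).insert v ((pvIndexMap l).size : Int)) := by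
  simp [pvIndexMap, List.foldl_append]

theorem pvF_get? (d : PySem.Dict Int (List String)) (i : Int) :
    (pvF d).get? i = (d.get? i).map pvIndexMap := by
  simp [pvF, PySem.Dict.get?, List.find?_map, Function.comp_def, Option.map_map]

theorem pvCell_comm (d : PySem.Dict Int (List String)) (hnd : d.keys.Nodup) (iv : Int × String) :
    pvACell (pvF d) iv = pvF (pvGCell d iv) := by
  obtain ⟨i, v⟩ := iv
  unfold pvACell pvGCell PySem.Dict.modify
  by_cases hc : d.contains i = true
  · -- column i already present
    obtain ⟨L, hL⟩ : ∃ L, d.get? i = some L := by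
      have := PySem.Dict.contains_eq_isSome_get? d i
      rw [hc] at this
      exact Option.isSome_iff_exists.mp this.symm
    have hLD : d.getD i [] = L := by rw [PySem.Dict.getD_eq_get?_getD, hL]; rfl
    have hFc : (pvF d).contains i = true := by rw [pvF_contains]; exact hc
    have hm : (pvF d).getD i PySem.Dict.empty = pvIndexMap L := by
      rw [PySem.Dict.getD_eq_get?_getD, pvF_get?, hL]; rfl
    simp only [pvF_contains, hc, if_true, hm, hLD]
    by_cases hv : (pvIndexMap L).contains v = true
    · simp only [hv, if_true]
      apply PySem.Dict.ext
      simp only [pvF]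
      rw [PySem.Dict.items_insert_of_contains _ _ hc, List.map_map]
      apply List.map_congr_left
      intro p hp
      by_cases hpi : p.1 = i
      · have hp2 : p.2 = L := by
          have := PySem.Dict.get?_of_mem_items d (k := p.1) (v := p.2) (by simpa using hp) hnd
          rw [hpi, hL] at this
          exact (Option.some_injective _ this).symm
        simp [hpi, hp2, pvIndexMap_append, hv]
      · simp [hpi]
    · have hv' : (pvIndexMap L).contains v = false := by simpa using hv
      simp only [hv', Bool.false_eq_true, if_false]
      apply PySem.Dict.ext
      rw [PySem.Dict.items_insert_of_contains _ _ hFc]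
      simp only [pvF]
      rw [PySem.Dict.items_insert_of_contains _ _ hc, List.map_map, List.map_map]
      apply List.map_congr_left
      intro p hp
      by_cases hpi : p.1 = i
      · simp [hpi, pvIndexMap_append, hv']
      · simp [hpi]
  · -- fresh column i
    have hc' : d.contains i = false := by simpa using hc
    have hFc : (pvF d).contains i = false := by rw [pvF_contains]; exact hc'
    have hLD : d.getD i [] = [] := PySem.Dict.getD_of_not_contains d [] hc'
    simp only [pvF_contains, hc', if_false, Bool.false_eq_true,
      PySem.Dict.getD_insert_self, PySem.Dict.contains_empty,
      PySem.Dict.insert_insert_self, hLD]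
    apply PySem.Dict.ext
    rw [PySem.Dict.items_insert_of_not_contains _ _ hFc]
    simp only [pvF]
    rw [PySem.Dict.items_insert_of_not_contains _ _ hc']
    simp [pvIndexMap, PySem.Dict.empty, PySem.Dict.size]

theorem pvNodup_gCell (d : PySem.Dict Int (List String)) (hnd : d.keys.Nodup) (iv : Int × String) :
    (pvGCell d iv).keys.Nodup := by
  unfold pvGCell PySem.Dict.modify
  exact PySem.Dict.nodup_keys_insert _ _ _ hnd

theorem pvRow_comm (l : List (Int × String)) (d : PySem.Dict Int (List String))
    (hnd : d.keys.Nodup) :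
    l.foldl pvACell (pvF d) = pvF (l.foldl pvGCell d) := by
  induction l generalizing d with
  | nil => rfl
  | cons iv t ih =>
      simp only [List.foldl_cons, pvCell_comm d hnd iv]
      exact ih _ (pvNodup_gCell d hnd iv)

theorem pvNodup_row (l : List (Int × String)) (d : PySem.Dict Int (List String))
    (hnd : d.keys.Nodup) : (l.foldl pvGCell d).keys.Nodup := by
  induction l generalizing d with
  | nil => exact hnd
  | cons iv t ih => exact ih _ (pvNodup_gCell d hnd iv)

theorem pvData_comm (data : List (List String)) (d : PySem.Dict Int (List String))
    (hnd : d.keys.Nodup) :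
    data.foldl (fun hm row => (PySem.List.enumerate row).foldl pvACell hm) (pvF d)
      = pvF (data.foldl (fun d row => (PySem.List.enumerate row).foldl pvGCell d) d) := by
  induction data generalizing d with
  | nil => rfl
  | cons row t ih =>
      simp only [List.foldl_cons, pvRow_comm _ d hnd]
      exact ih _ (pvNodup_row _ d hnd)

theorem pvNodup_data (data : List (List String)) :
    (data.foldl (fun d row => (PySem.List.enumerate row).foldl pvGCell d)
      (PySem.Dict.empty : PySem.Dict Int (List String))).keys.Nodup := by
  have h : ∀ (t : List (List String)) (d : PySem.Dict Int (List String)), d.keys.Nodup →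
      (t.foldl (fun d row => (PySem.List.enumerate row).foldl pvGCell d) d).keys.Nodup := by
    intro t
    induction t with
    | nil => intro d h; exact h
    | cons r t ih => intro d h; exact ih _ (pvNodup_row _ d h)
  exact h data _ (by simp [PySem.Dict.keys, PySem.Dict.empty])

theorem pvPhase2 (cols : PySem.Dict Int (List String)) (hnd : cols.keys.Nodup) :
    (cols.items.foldl (fun r p => r.insert p.1 (pvIndexMap p.2)) PySem.Dict.empty).items
      = (pvF cols).items := by
  rw [PySem.Dict.items_foldl_insert_fresh cols.items (fun p => p.1) (fun p => pvIndexMap p.2)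
        PySem.Dict.empty (fun a _ => PySem.Dict.contains_empty a.1) hnd]
  rfl

-- ===== VERDICT (by name: the statement is the Claim_ definition above) =====
theorem build_hash_maps_spec : Claim_equal_build_hash_maps := by
  intro data _
  unfold Spec_build_hash_maps build_hash_maps build_hash_maps_alt
  have h0 : (PySem.Dict.empty : PySem.Dict Int (PySem.Dict String Int)) = pvF PySem.Dict.empty := rfl
  conv_lhs => rw [h0, pvData_comm data PySem.Dict.empty (by simp [PySem.Dict.keys, PySem.Dict.empty])]
  simp only [pvPhase2 _ (pvNodup_data data)]
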